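-- pv_equiv track=rewrite | github.com/brave24221/practice | edabit-problems/hard/general-practice/odd_vs_evens.py | odds_vs_evens
-- ===== SOURCE A (Python) =====
-- def odds_vs_evens(num):
--     lst = [int(x) for x in str(num)]
--     odds = sum(list(filter(lambda x: (x % 2) == 1, lst)))
--     evens = sum(list(filter(lambda x: (x % 2) == 0, lst)))
--
--     if odds > evens:
--         return 'odd'
--     if evens > odds:
--         return 'even'
--
--     return 'equal'
-- ===== SOURCE B (Python) =====
-- def odds_vs_evens(num):
--     diff = 0
--     for x in str(num):
--         d = int(x)
--         diff += d if d % 2 == 1 else -d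
--     return 'odd' if diff > 0 else 'even' if diff < 0 else 'equal'
-- ===== Notes on version B (the rewrite author's own statement) =====
-- stated objective: simpler
-- what changed: Replaces A's digit-list build plus two filter+sum passes and a two-way comparison with a single pass over str(num) maintaining one signed accumulator (add odd digits, subtract even digits) whose sign decides the answer.
import Mathlib
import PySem

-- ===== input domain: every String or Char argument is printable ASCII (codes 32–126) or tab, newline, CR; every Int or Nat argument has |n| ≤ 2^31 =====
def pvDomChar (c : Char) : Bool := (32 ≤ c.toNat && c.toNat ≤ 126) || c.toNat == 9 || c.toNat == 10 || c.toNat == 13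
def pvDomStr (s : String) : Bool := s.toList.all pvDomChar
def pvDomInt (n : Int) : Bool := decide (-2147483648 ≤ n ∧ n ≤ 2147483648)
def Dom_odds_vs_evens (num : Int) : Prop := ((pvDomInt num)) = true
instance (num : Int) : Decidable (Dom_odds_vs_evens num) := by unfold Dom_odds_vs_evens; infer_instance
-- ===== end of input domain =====

-- B replaces A's digit-list + two filter/sum passes + two-way comparison with one pass
-- keeping a single signed accumulator whose sign decides the answer (objective: simpler).

-- ===== PORT A =====
-- int(x) on a one-character string; on Pre_ (0 ≤ num) every character of str(num) is a digit,
-- so ofStr? always succeeds and the getD 0 default is never taken.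
def pvIntChar (c : Char) : Int := (PySem.Int.ofStr? (String.ofList [c])).getD 0

def odds_vs_evens (num : Int) : String :=
  let lst := (PySem.Int.toChars num).map pvIntChar
  let odds := (lst.filter (fun x => PySem.Int.mod x 2 == 1)).sum
  let evens := (lst.filter (fun x => PySem.Int.mod x 2 == 0)).sum
  if odds > evens then "odd"
  else if evens > odds then "even"
  else "equal"

-- ===== PORT B =====
def odds_vs_evens_alt (num : Int) : String :=
  let diff := (PySem.Int.toChars num).foldl (fun acc c =>
    if PySem.Int.mod (pvIntChar c) 2 == 1 then acc + pvIntChar c else acc - pvIntChar c) 0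
  if diff > 0 then "odd"
  else if diff < 0 then "even"
  else "equal"

-- ===== PRECONDITION & SPEC =====
-- Pre_ excludes negative num, on which str(num) starts with '-' and int('-') raises ValueError in A (B raises there too).
def Pre_odds_vs_evens (num : Int) : Prop := 0 ≤ num
instance (num : Int) : Decidable (Pre_odds_vs_evens num) := by unfold Pre_odds_vs_evens; infer_instance
def pvWitness_odds_vs_evens : Int := (123)

def Spec_odds_vs_evens (num : Int) (out : String) : Prop := out = odds_vs_evens_alt num
instance (num : Int) (out : String) : Decidable (Spec_odds_vs_evens num out) := by unfold Spec_odds_vs_evens; infer_instance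

-- ===== CLAIM (what is proved, stated in full; the proofs are below) =====
def Claim_equal_odds_vs_evens : Prop := ∀ (num : Int), Dom_odds_vs_evens num → Pre_odds_vs_evens num → Spec_odds_vs_evens num (odds_vs_evens num)

-- ===== LEMMAS AND PROOFS =====

-- B's single signed accumulator equals (sum of odd-filtered digits) minus (sum of even-filtered digits).
theorem pv_fold_eq_sums (l : List Char) (acc : Int) :
    l.foldl (fun acc c =>
        if PySem.Int.mod (pvIntChar c) 2 == 1 then acc + pvIntChar c else acc - pvIntChar c) acc
      = acc + ((l.map pvIntChar).filter (fun x => PySem.Int.mod x 2 == 1)).sum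
            - ((l.map pvIntChar).filter (fun x => PySem.Int.mod x 2 == 0)).sum := by
  induction l generalizing acc with
  | nil => simp
  | cons c t ih =>
    simp only [List.foldl_cons, List.map_cons, List.filter_cons]
    rw [ih]
    simp only [beq_iff_eq, PySem.Int.mod_eq_emod_of_pos (show (0:Int) < 2 by norm_num)]
    split_ifs <;> (try simp only [List.sum_cons]) <;> omega

theorem odds_vs_evens_eq (num : Int) :
    odds_vs_evens num = odds_vs_evens_alt num := by
  show (let lst := (PySem.Int.toChars num).map pvIntChar
    let odds := (lst.filter (fun x => PySem.Int.mod x 2 == 1)).sum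
    let evens := (lst.filter (fun x => PySem.Int.mod x 2 == 0)).sum
    if odds > evens then "odd" else if evens > odds then "even" else "equal")
   = (let diff := (PySem.Int.toChars num).foldl (fun acc c =>
        if PySem.Int.mod (pvIntChar c) 2 == 1 then acc + pvIntChar c else acc - pvIntChar c) 0
      if diff > 0 then "odd" else if diff < 0 then "even" else "equal")
  simp only [pv_fold_eq_sums]
  set o := (((PySem.Int.toChars num).map pvIntChar).filter
      (fun x => PySem.Int.mod x 2 == 1)).sum with ho
  set e := (((PySem.Int.toChars num).map pvIntChar).filter
      (fun x => PySem.Int.mod x 2 == 0)).sum with he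
  split_ifs <;> first | rfl | omega

-- ===== VERDICT (by name: the statement is the Claim_ definition above) =====
theorem odds_vs_evens_spec : Claim_equal_odds_vs_evens := by
  intro num _ _
  exact odds_vs_evens_eq num
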